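-- pv_equiv track=rewrite | github.com/zbrightUMKC/CS101L | Assignment_9/Source code/lab9.py | create_reported_date_dict
-- ===== SOURCE A (Python) =====
-- def create_reported_date_dict(list_of_crimes):
--     '''The create_reported_date_dict function takes a list, which is the list of lists returned from the read_in_file function above and returns a dictionary
--     where the key is a date of the year found in index 1, and the value is how many times a crime occurred on that data as read from the file.'''
--     date_list = [] # Initialize empty list
--     for crime in list_of_crimes[1:]: # Build list of dates that crimes have occured
--         date_list.append((crime[1]))
--     date_count = {} # Initialize empty dict
--     for date in date_list: # Build dict of date:crime occurence pairs
--         if date in date_count: # If date in dict add one to the value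
--             date_count[date] = date_count[date] + 1
--         else: # If date not in dict, add it
--             date_count[date] = 1
--     return date_count
-- ===== SOURCE B (Python) =====
-- def create_reported_date_dict(list_of_crimes):
--     '''Iterative remove-and-count: repeatedly take the first remaining date,
--     record its total count at once, and strip every occurrence of it before
--     continuing with the rest.'''
--     dates = [crime[1] for crime in list_of_crimes[1:]]
--     date_count = {}
--     while dates:
--         first = dates[0]
--         date_count[first] = dates.count(first)
--         dates = [d for d in dates[1:] if d != first]
--     return date_count
-- ===== Notes on version B (the rewrite author's own statement) =====
-- stated objective: alternative
-- what changed: A increments a per-date hash counter row by row; B repeatedly takes the first remaining date, records its total count in one shot, and filters all its occurrences out of the worklist before continuing (remove-and-count worklist instead of incremental hash counting).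
import Mathlib
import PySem

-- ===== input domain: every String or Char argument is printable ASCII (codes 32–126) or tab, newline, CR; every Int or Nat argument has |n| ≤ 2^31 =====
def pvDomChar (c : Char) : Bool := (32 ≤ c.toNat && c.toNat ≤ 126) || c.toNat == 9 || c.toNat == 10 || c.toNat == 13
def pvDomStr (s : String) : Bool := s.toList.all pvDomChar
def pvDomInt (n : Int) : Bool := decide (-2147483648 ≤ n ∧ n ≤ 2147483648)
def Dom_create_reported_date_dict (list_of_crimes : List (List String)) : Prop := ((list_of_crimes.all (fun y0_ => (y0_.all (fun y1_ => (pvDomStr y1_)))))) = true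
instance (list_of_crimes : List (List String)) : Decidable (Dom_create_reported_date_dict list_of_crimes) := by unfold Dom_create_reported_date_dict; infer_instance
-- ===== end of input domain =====

-- B replaces A's incremental per-row counter by an iterative remove-and-count worklist over the
-- extracted date column (alternative decomposition, same results, not claimed faster).


-- ===== PORT A =====
-- crime[1] raises IndexError on a row shorter than 2; pyGetD is exact under Pre_ below.
def create_reported_date_dict (list_of_crimes : List (List String)) : List (String × Int) :=
  let date_list : List String :=
    (PySem.List.slice list_of_crimes (some 1) none).foldl
      (fun acc crime => acc ++ [PySem.List.pyGetD crime 1 ""]) []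
  let date_count : PySem.Dict String Int :=
    date_list.foldl
      (fun dc date =>
        if dc.contains date then dc.insert date (dc.getD date 0 + 1)
        else dc.insert date 1)
      PySem.Dict.empty
  date_count.items

-- ===== PORT B =====
-- B's while-loop over a shrinking worklist: take the first date, store its total count,
-- drop all its occurrences, repeat.
def crddStrip : List String → PySem.Dict String Int → PySem.Dict String Int
  | [], date_count => date_count
  | first :: rest, date_count =>
      crddStrip (rest.filter (fun d => !(d == first)))
        (date_count.insert first ((PySem.List.count (first :: rest) first : Int)))
termination_by l _ => l.length
decreasing_by simpa using le_trans (List.length_filter_le _ _) (by simp)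

def create_reported_date_dict_alt (list_of_crimes : List (List String)) : List (String × Int) :=
  let dates : List String :=
    (PySem.List.slice list_of_crimes (some 1) none).map
      (fun crime => PySem.List.pyGetD crime 1 "")
  (crddStrip dates PySem.Dict.empty).items

-- ===== PRECONDITION & SPEC =====
-- Pre_ excludes exactly the inputs where 'crime[1]' raises IndexError in both Pythons: a row after
-- the first with fewer than 2 fields.
def Pre_create_reported_date_dict (list_of_crimes : List (List String)) : Prop :=
  ∀ crime ∈ list_of_crimes.drop 1, 2 ≤ crime.length
instance (list_of_crimes : List (List String)) : Decidable (Pre_create_reported_date_dict list_of_crimes) := by unfold Pre_create_reported_date_dict; infer_instance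
def pvWitness_create_reported_date_dict : List (List String) :=
  [["id", "date"], ["1", "01/02/2019"], ["2", "01/02/2019"], ["3", "02/03/2019"]]

def Spec_create_reported_date_dict (list_of_crimes : List (List String)) (out : List (String × Int)) : Prop := out = create_reported_date_dict_alt list_of_crimes
instance (list_of_crimes : List (List String)) (out : List (String × Int)) : Decidable (Spec_create_reported_date_dict list_of_crimes out) := by unfold Spec_create_reported_date_dict; infer_instance

-- ===== CLAIM (what is proved, stated in full; the proofs are below) =====
def Claim_equal_create_reported_date_dict : Prop := ∀ (list_of_crimes : List (List String)), Dom_create_reported_date_dict list_of_crimes → Pre_create_reported_date_dict list_of_crimes → Spec_create_reported_date_dict list_of_crimes (create_reported_date_dict list_of_crimes)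

-- ===== LEMMAS AND PROOFS =====

-- A's counting loop is Counter(dates): its step is the modify/insert-with-increment step.
theorem afold_eq_counter (l : List String) :
    l.foldl
      (fun dc date =>
        if dc.contains date then dc.insert date (dc.getD date 0 + 1)
        else dc.insert date 1)
      PySem.Dict.empty = PySem.Dict.counter l := by
  rw [← PySem.Dict.foldl_insert_getD_add_one_eq_counter]
  apply List.foldl_ext
  intro dc date _
  by_cases h : dc.contains date
  · simp [h]
  · simp [h, PySem.Dict.getD_of_not_contains dc 0 (by simpa using h)]

-- first-occurrence dedup commutes with filtering
theorem ofList_filter (p : String → Bool) (l : List String) :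
    PySem.Set.ofList (l.filter p) = (PySem.Set.ofList l).filter p := by
  induction l with
  | nil => rfl
  | cons y ys ih =>
    rw [PySem.Set.ofList_cons, PySem.Set.discard]
    by_cases h : p y
    · rw [List.filter_cons_of_pos h, PySem.Set.ofList_cons, PySem.Set.discard, ih,
        List.filter_cons_of_pos h, List.filter_comm]
    · have hf : p y = false := by simpa using h
      rw [List.filter_cons_of_neg (by simp [hf]), ih,
        List.filter_cons_of_neg (by simp [hf]), List.filter_filter]
      apply List.filter_congr
      intro a _
      by_cases ha : p a
      · have : a ≠ y := fun e => by rw [e, hf] at ha; exact Bool.false_ne_true ha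
        simp [ha, this]
      · simp [ha]

-- stripping one value then deduping = dedup then discard
theorem discard_ofList_filter (x : String) (l : List String) :
    (PySem.Set.ofList l).discard x
      = PySem.Set.ofList (l.filter (fun d => !(d == x))) := by
  rw [PySem.Set.discard, ofList_filter]

-- the worklist loop appends each distinct date with its count, in first-occurrence order
theorem crddStrip_items (l : List String) (c : PySem.Dict String Int)
    (h : ∀ k ∈ l, c.contains k = false) :
    (crddStrip l c).items
      = c.items ++ (PySem.Set.ofList l).map (fun k => (k, (l.count k : Int))) := by
  induction hl : l.length using Nat.strong_induction_on generalizing l c with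
  | _ n ih =>
    cases l with
    | nil => simp [crddStrip.eq_1]
    | cons x xs =>
      rw [crddStrip.eq_2]
      have hlen : (xs.filter (fun d => !(d == x))).length < n := by
        subst hl; simpa using Nat.lt_succ_of_le (List.length_filter_le _ _)
      rw [ih _ hlen _ _ ?_ rfl]
      · rw [PySem.Dict.items_insert_of_not_contains _ _ (h x (by simp)),
          PySem.Set.ofList_cons, discard_ofList_filter]
        simp only [List.map_cons, List.append_assoc, List.singleton_append,
          PySem.List.count_eq]
        congr 2
        simp only [List.map_inj_left, PySem.Set.mem_ofList, List.mem_filter,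
          Bool.not_eq_eq_eq_not, Bool.not_true, beq_eq_false_iff_ne, and_imp,
          Prod.mk.injEq, true_and]
        intro a _ ha
        rw [List.count_filter (p := fun d => !d == x) (by simpa using ha),
          List.count_cons]
        simp [Ne.symm ha]
      · intro k hk
        rcases List.mem_filter.mp hk with ⟨hkxs, hbx⟩
        have hkx : (k == x) = false := by simpa using hbx
        simp [PySem.Dict.contains_insert, hkx, h k (by simp [hkxs])]

-- ===== VERDICT (by name: the statement is the Claim_ definition above) =====
theorem create_reported_date_dict_spec : Claim_equal_create_reported_date_dict := by
  unfold Claim_equal_create_reported_date_dict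
  intro lst _ _
  unfold Spec_create_reported_date_dict create_reported_date_dict create_reported_date_dict_alt
  simp only [PySem.List.foldl_append_singleton_eq_map]
  rw [afold_eq_counter, PySem.Dict.items_counter,
    crddStrip_items _ _ (by intro k _; simp [PySem.Dict.contains_empty])]
  simp [PySem.Dict.empty]
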